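-- pv_equiv track=rewrite | github.com/juniorod99/backtracking | backtracking.py | excluiRep
-- ===== SOURCE A (Python) =====
-- def excluiRep(vizinhos):
--   lista_mod = vizinhos.copy()
--   conjunto = set(LE).union(LNE).union(BSS)
--   array_resultante = list(conjunto)
--
--   for elemento in array_resultante:
--     if elemento in lista_mod:
--       lista_mod.remove(elemento)
--
--   return lista_mod
--
-- LE = ['A']
--
-- LNE = ['A']
--
-- BSS = []
-- ===== SOURCE B (Python) =====
-- LE = ['A']
--
-- LNE = ['A']
--
-- BSS = []
--
-- def excluiRep(vizinhos):
--   # One forward pass: skip the FIRST occurrence of each excluded value.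
--   conjunto = set(LE).union(LNE).union(BSS)
--   resultado = []
--   removed = set()
--   for x in vizinhos:
--     if x in conjunto and x not in removed:
--       removed.add(x)
--     else:
--       resultado.append(x)
--   return resultado
-- ===== Notes on version B (the rewrite author's own statement) =====
-- stated objective: simpler
-- what changed: Replaces the per-excluded-element list scan and in-place .remove() with a single forward pass that appends to a fresh result list, skipping the first occurrence of each excluded value via a 'removed' set.
import Mathlib
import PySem

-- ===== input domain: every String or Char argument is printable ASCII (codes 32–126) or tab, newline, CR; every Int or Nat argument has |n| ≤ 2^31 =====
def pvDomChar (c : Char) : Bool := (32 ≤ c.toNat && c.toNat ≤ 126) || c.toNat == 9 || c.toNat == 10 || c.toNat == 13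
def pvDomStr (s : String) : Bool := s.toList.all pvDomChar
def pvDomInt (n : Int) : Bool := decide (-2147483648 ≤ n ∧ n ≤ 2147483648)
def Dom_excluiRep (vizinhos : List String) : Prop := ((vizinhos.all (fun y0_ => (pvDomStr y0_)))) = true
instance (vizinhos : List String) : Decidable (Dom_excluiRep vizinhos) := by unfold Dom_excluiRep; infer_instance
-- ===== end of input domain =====

-- B replaces A's per-excluded-element list scan / .remove() with one forward pass
-- building a fresh result list and a 'removed' set (objective: simpler).

-- module constants (same module context for both programs)
def pyLE : List String := ["A"]
def pyLNE : List String := ["A"]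
def pyBSS : List String := []

-- ===== PORT A =====
def excluiRep (vizinhos : List String) : List String :=
  let lista_mod := vizinhos
  let conjunto : PySem.Set String :=
    PySem.Set.union (PySem.Set.union (PySem.Set.ofList pyLE) pyLNE) pyBSS
  let array_resultante : List String := conjunto
  array_resultante.foldl (fun lm elemento =>
    if elemento ∈ lm then
      match PySem.List.remove? lm elemento with
      | some l => l
      | none => lm
    else lm) lista_mod

-- ===== PORT B =====
def excluiRep_alt (vizinhos : List String) : List String :=
  let conjunto : PySem.Set String :=
    PySem.Set.union (PySem.Set.union (PySem.Set.ofList pyLE) pyLNE) pyBSS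
  (vizinhos.foldl (fun st x =>
      if PySem.Set.contains conjunto x && !(PySem.Set.contains st.2 x) then
        (st.1, PySem.Set.add st.2 x)
      else
        (st.1 ++ [x], st.2))
    (([], PySem.Set.empty) : List String × PySem.Set String)).1

-- ===== PRECONDITION & SPEC =====
def Spec_excluiRep (vizinhos : List String) (out : List String) : Prop := out = excluiRep_alt vizinhos
instance (vizinhos : List String) (out : List String) : Decidable (Spec_excluiRep vizinhos out) := by unfold Spec_excluiRep; infer_instance

-- ===== CLAIM (what is proved, stated in full; the proofs are below) =====
def Claim_equal_excluiRep : Prop := ∀ (vizinhos : List String), Dom_excluiRep vizinhos → Spec_excluiRep vizinhos (excluiRep vizinhos)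

-- ===== LEMMAS AND PROOFS =====

-- B's step function, with the exclusion set already evaluated to ["A"]
def pvStep (st : List String × PySem.Set String) (x : String) : List String × PySem.Set String :=
  if PySem.Set.contains (["A"] : PySem.Set String) x && !(PySem.Set.contains st.2 x) then
    (st.1, PySem.Set.add st.2 x)
  else
    (st.1 ++ [x], st.2)

-- once "A" is in the removed set, the loop just appends everything
lemma pvLoop_done (v : List String) (res : List String) (rem : PySem.Set String)
    (h : "A" ∈ rem) :
    (v.foldl pvStep (res, rem)).1 = res ++ v := by
  induction v generalizing res rem with
  | nil => simp
  | cons x xs ih =>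
    by_cases hx : x = "A"
    · subst hx
      simp only [pvStep, List.foldl_cons, PySem.Set.contains, List.contains_eq_mem]
      simp [h, ih _ _ h]
    · simp only [pvStep, List.foldl_cons, PySem.Set.contains, List.contains_eq_mem]
      simp [hx, ih _ _ h]

-- main loop invariant: while "A" not yet removed, the loop computes remove?-of-"A"
lemma pvLoop_main (v : List String) (res : List String) (rem : PySem.Set String)
    (h : "A" ∉ rem) :
    (v.foldl pvStep (res, rem)).1 =
      res ++ (match PySem.List.remove? v "A" with | some l => l | none => v) := by
  induction v generalizing res rem with
  | nil => simp [PySem.List.remove?]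
  | cons x xs ih =>
    by_cases hx : x = "A"
    · subst hx
      have hadd : "A" ∈ PySem.Set.add rem "A" := by
        rw [PySem.Set.mem_add]; right; rfl
      simp only [pvStep, List.foldl_cons, PySem.Set.contains, List.contains_eq_mem]
      simp only [PySem.List.remove?_cons_self]
      simp [h]
      exact pvLoop_done xs res _ (by simp)
    · simp only [pvStep, List.foldl_cons, PySem.Set.contains, List.contains_eq_mem]
      rw [PySem.List.remove?_cons_of_ne _ hx]
      have := ih (res ++ [x]) rem h
      cases hrem : PySem.List.remove? xs "A" with
      | none =>
        simp only [hrem] at this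
        simp [hx, this]
      | some l =>
        simp only [hrem] at this
        simp [hx, this]

-- A reduces to the single remove?-of-"A" step
lemma pvA_eq (v : List String) :
    excluiRep v = (match PySem.List.remove? v "A" with | some l => l | none => v) := by
  have hset : PySem.Set.union (PySem.Set.union (PySem.Set.ofList pyLE) pyLNE) pyBSS
      = (["A"] : List String) := by decide
  unfold excluiRep
  rw [hset]
  simp only [List.foldl_cons, List.foldl_nil]
  by_cases hm : ("A" : String) ∈ v
  · rw [if_pos hm, PySem.List.remove?_eq_some_erase _ _ hm]
  · rw [if_neg hm, (PySem.List.remove?_eq_none_iff v "A").mpr hm]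

lemma pvB_eq (v : List String) :
    excluiRep_alt v = (match PySem.List.remove? v "A" with | some l => l | none => v) := by
  have hset : PySem.Set.union (PySem.Set.union (PySem.Set.ofList pyLE) pyLNE) pyBSS
      = (["A"] : List String) := by decide
  unfold excluiRep_alt
  rw [hset]
  have h0 : ("A" : String) ∉ (PySem.Set.empty : PySem.Set String) := by
    simp [PySem.Set.empty]
  show (v.foldl pvStep (([], PySem.Set.empty) : List String × PySem.Set String)).1 = _
  rw [pvLoop_main v [] PySem.Set.empty h0]
  simp
-- ===== VERDICT (by name: the statement is the Claim_ definition above) =====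
theorem excluiRep_spec : Claim_equal_excluiRep := by
  intro v _
  show excluiRep v = excluiRep_alt v
  rw [pvA_eq, pvB_eq]
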